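-- pv_equiv track=rewrite | github.com/TengFeiyang01/Algorithm | bishi/Amazon_OA-main/GenerateNewArray.py | generateNewArray
-- ===== SOURCE A (Python) =====
-- from heapq import heapify, heappop, heappush
--
-- def generateNewArray(arr, state, m):
--     ans = []
--     n = len(arr)
--     state = list(state)
--     h = []
--     for i, (x, c) in enumerate(zip(arr, state)):
--         if c == '1':
--             heappush(h, (-x, i))
--
--     ans = []
--     for j in range(m):
--         x, i = heappop(h)
--         ans.append(-x)
--         if i and state[i - 1] == '0':
--             heappush(h, (-arr[i - 1], i - 1))
--             state[i - 1] = '1'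
--     return ans
-- ===== SOURCE B (Python) =====
-- def generateNewArray(arr, state, m):
--     k = min(len(arr), len(state))
--     active = [state[i] == '1' for i in range(k)]
--     seen = list(active)
--     ans = []
--     for _ in range(m):
--         best = None
--         for i in range(k):
--             if active[i] and (best is None or arr[i] > arr[best]):
--                 best = i
--         ans.append(arr[best])
--         active[best] = False
--         if best > 0 and state[best - 1] == '0' and not seen[best - 1]:
--             active[best - 1] = True
--             seen[best - 1] = True
--     return ans
-- ===== Notes on version B (the rewrite author's own statement) =====
-- stated objective: simpler
-- what changed: B drops the heap entirely: it keeps boolean active/seen arrays over the zipped prefix and, for each of the m pops, does a linear scan for the smallest active index of maximal value, activating the left neighbour exactly when its original char is '0' and it was never activated.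
import Mathlib
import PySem

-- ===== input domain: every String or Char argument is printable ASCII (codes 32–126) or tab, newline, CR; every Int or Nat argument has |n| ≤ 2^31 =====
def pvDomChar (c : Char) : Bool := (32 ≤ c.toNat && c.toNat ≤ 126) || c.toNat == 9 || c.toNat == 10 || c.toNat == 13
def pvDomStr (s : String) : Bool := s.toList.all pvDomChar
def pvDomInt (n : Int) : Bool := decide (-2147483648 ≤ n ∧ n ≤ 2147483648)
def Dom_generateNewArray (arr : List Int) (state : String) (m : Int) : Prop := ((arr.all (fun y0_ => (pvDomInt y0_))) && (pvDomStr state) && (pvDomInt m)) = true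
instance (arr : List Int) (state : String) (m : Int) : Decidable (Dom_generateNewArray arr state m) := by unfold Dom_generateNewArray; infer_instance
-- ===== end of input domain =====

-- B replaces A's heap with boolean active/seen arrays and a linear max-scan per pop (objective: simpler, no speed claim).

-- ===== PORT A =====

-- lexicographic < on the heap pairs (-x, i); heapq compares tuples this way
def pvPairLt (a b : Int × Int) : Bool := a.1 < b.1 || (a.1 == b.1 && a.2 < b.2)

-- heappop's selected element: the minimum of the heap's multiset (heapq's contract)
def pvMin? : List (Int × Int) → Option (Int × Int)
  | [] => none
  | p :: t => some (t.foldl (fun q r => if pvPairLt r q then r else q) p)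

-- the 'for j in range(m)' loop of A; where Python raises IndexError (empty heap) the port stops
def pvLoopA (arr : List Int) : List (Int × Int) → List Char → Nat → List Int
  | _, _, 0 => []
  | h, st, fuel+1 =>
    match pvMin? h with
    | none => []   -- Python: heappop from empty heap raises IndexError (outside Pre_)
    | some q =>
      let h' := h.erase q
      if q.2 != 0 && (PySem.List.pyGetD st (q.2 - 1) ' ' == '0') then
        (-q.1) :: pvLoopA arr ((-(PySem.List.pyGetD arr (q.2 - 1) 0), q.2 - 1) :: h')
                    (PySem.List.pySetD st (q.2 - 1) '1') fuel
      else
        (-q.1) :: pvLoopA arr h' st fuel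

def generateNewArray (arr : List Int) (state : String) (m : Int) : List Int :=
  let st := state.toList
  let h := (PySem.List.enumerate (arr.zip st) 0).foldl
      (fun h p => if p.2.2 == '1' then h ++ [(-p.2.1, p.1)] else h) []
  pvLoopA arr h st m.toNat

-- ===== PORT B =====

-- the inner 'for i in range(k)' scan of Source B: smallest active index of maximal arr value
def pvStep (arr : List Int) (act : List Bool) (best : Option Nat) (i : Nat) : Option Nat :=
  if act.getD i false && (match best with
                          | none => true
                          | some b => decide (arr.getD b 0 < arr.getD i 0)) then some i
  else best

def pvScan (arr : List Int) (act : List Bool) (k : Nat) : Option Nat :=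
  (List.range k).foldl (pvStep arr act) none

-- the 'for _ in range(m)' loop of Source B; where Python raises (best is None) the port stops
def pvLoopB (arr : List Int) (state0 : List Char) (k : Nat) : List Bool → List Bool → Nat → List Int
  | _, _, 0 => []
  | act, seen, fuel+1 =>
    match pvScan arr act k with
    | none => []   -- Source B: arr[None] raises TypeError (outside Pre_)
    | some b =>
      let act' := act.set b false
      if b != 0 && (state0.getD (b - 1) ' ' == '0') && !(seen.getD (b - 1) false) then
        arr.getD b 0 :: pvLoopB arr state0 k (act'.set (b - 1) true) (seen.set (b - 1) true) fuel
      else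
        arr.getD b 0 :: pvLoopB arr state0 k act' seen fuel

def generateNewArray_alt (arr : List Int) (state : String) (m : Int) : List Int :=
  let k := min arr.length state.toList.length
  let act := (List.range k).map (fun i => state.toList.getD i ' ' == '1')
  pvLoopB arr state.toList k act act m.toNat

-- ===== PRECONDITION & SPEC =====

-- index j is eventually activated: some i ≥ j has char '1' with only '0' chars strictly between
def pvReach (state0 : List Char) (k j : Nat) : Bool :=
  (List.range k).any (fun i =>
    decide (j ≤ i) && (state0.getD i ' ' == '1')
      && (List.range i).all (fun t => !decide (j ≤ t) || (state0.getD t ' ' == '0')))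

-- Pre_: A pops one element per step and every reachable index is popped exactly once, so A
-- returns normally iff m ≤ (number of reachable indices); otherwise heappop raises IndexError.
def Pre_generateNewArray (arr : List Int) (state : String) (m : Int) : Prop :=
  m ≤ ((List.range (min arr.length state.toList.length)).countP
        (pvReach state.toList (min arr.length state.toList.length)) : Nat)
instance (arr : List Int) (state : String) (m : Int) : Decidable (Pre_generateNewArray arr state m) := by
  unfold Pre_generateNewArray; infer_instance

def pvWitness_generateNewArray : List Int × String × Int := ([3, 1, 2], "101", 2)

def Spec_generateNewArray (arr : List Int) (state : String) (m : Int) (out : List Int) : Prop := out = generateNewArray_alt arr state m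
instance (arr : List Int) (state : String) (m : Int) (out : List Int) : Decidable (Spec_generateNewArray arr state m out) := by unfold Spec_generateNewArray; infer_instance

-- ===== CLAIM (what is proved, stated in full; the proofs are below) =====
def Claim_equal_generateNewArray : Prop := ∀ (arr : List Int) (state : String) (m : Int), Dom_generateNewArray arr state m → Pre_generateNewArray arr state m → Spec_generateNewArray arr state m (generateNewArray arr state m)

-- ===== LEMMAS AND PROOFS =====

theorem pvPairLt_iff (a b : Int × Int) :
    pvPairLt a b = true ↔ (a.1 < b.1 ∨ (a.1 = b.1 ∧ a.2 < b.2)) := by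
  simp [pvPairLt]

-- getD after set, in if-form
theorem pvGetD_set {α : Type} (l : List α) (i j : Nat) (v d : α) :
    (l.set i v).getD j d = if i = j ∧ j < l.length then v else l.getD j d := by
  rcases Nat.lt_or_ge j l.length with hj | hj
  · by_cases hij : i = j
    · subst hij
      simp [List.getD_eq_getElem?_getD, hj]
    · simp [List.getD_eq_getElem?_getD, List.getElem?_set_ne hij, hij]
  · have h1 : l.getD j d = d := by
      simp [List.getD_eq_getElem?_getD, List.getElem?_eq_none (by omega)]
    have h2 : (l.set i v).getD j d = d := by
      have he : (l.set i v)[j]? = none := List.getElem?_eq_none (by simp; omega)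
      simp [List.getD_eq_getElem?_getD, he]
    rw [h1, h2]
    have : ¬ (i = j ∧ j < l.length) := by omega
    rw [if_neg this]

-- the foldl-min is a member of the list
theorem pvFoldMin_mem (t : List (Int × Int)) : ∀ p : Int × Int,
    (t.foldl (fun q r => if pvPairLt r q then r else q) p) ∈ p :: t := by
  induction t with
  | nil => intro p; simp
  | cons x t ih =>
    intro p
    have h := ih (if pvPairLt x p then x else p)
    simp only [List.foldl_cons]
    rcases List.mem_cons.mp h with h1 | h1
    · rw [h1]; by_cases hx : pvPairLt x p = true <;> simp [hx]
    · exact List.mem_cons_of_mem _ (List.mem_cons_of_mem _ h1)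

theorem pvPairLt_eq_false_iff (a b : Int × Int) :
    pvPairLt a b = false ↔ (b.1 < a.1 ∨ (b.1 = a.1 ∧ b.2 ≤ a.2)) := by
  simp only [Bool.eq_false_iff, ne_eq, pvPairLt_iff]; omega

-- the foldl-min is ≤ (lex) every member
theorem pvFoldMin_min (t : List (Int × Int)) : ∀ p, ∀ r ∈ p :: t,
    pvPairLt r (t.foldl (fun q r => if pvPairLt r q then r else q) p) = false := by
  induction t with
  | nil =>
    intro p r hr
    simp only [List.foldl_nil]
    simp at hr; subst hr
    rw [pvPairLt_eq_false_iff]; omega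
  | cons x t ih =>
    intro p r hr
    simp only [List.foldl_cons]
    by_cases hx : pvPairLt x p = true
    · rw [if_pos hx]
      have hA := ih x _ (List.mem_cons_self)
      have hp : pvPairLt p (t.foldl (fun q r => if pvPairLt r q then r else q) x) = false := by
        rw [pvPairLt_iff] at hx
        rw [pvPairLt_eq_false_iff] at hA ⊢
        omega
      rcases List.mem_cons.mp hr with h1 | h1
      · subst h1; exact hp
      · rcases List.mem_cons.mp h1 with h2 | h2
        · subst h2; exact hA
        · exact ih x r (List.mem_cons_of_mem _ h2)
    · rw [if_neg hx]
      have hA := ih p _ (List.mem_cons_self)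
      have hxp : pvPairLt x p = false := Bool.eq_false_iff.mpr hx
      have hx2 : pvPairLt x (t.foldl (fun q r => if pvPairLt r q then r else q) p) = false := by
        rw [pvPairLt_eq_false_iff] at hA hxp ⊢
        omega
      rcases List.mem_cons.mp hr with h1 | h1
      · subst h1; exact hA
      · rcases List.mem_cons.mp h1 with h2 | h2
        · subst h2; exact hx2
        · exact ih p r (List.mem_cons_of_mem _ h2)

theorem pvMin?_spec (h : List (Int × Int)) (q : Int × Int) (hq : pvMin? h = some q) :
    q ∈ h ∧ ∀ r ∈ h, pvPairLt r q = false := by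
  match h with
  | [] => simp [pvMin?] at hq
  | p :: t =>
    simp only [pvMin?, Option.some.injEq] at hq
    subst hq
    exact ⟨pvFoldMin_mem t p, fun r hr => pvFoldMin_min t p r hr⟩

theorem pvMin?_eq_none (h : List (Int × Int)) : pvMin? h = none ↔ h = [] := by
  match h with
  | [] => simp [pvMin?]
  | p :: t => simp [pvMin?]

-- characterisation of Source B's scan
def pvIsBest (arr : List Int) (act : List Bool) (k b : Nat) : Prop :=
  b < k ∧ act.getD b false = true ∧
  (∀ i, i < k → act.getD i false = true → arr.getD i 0 ≤ arr.getD b 0) ∧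
  (∀ i, i < b → act.getD i false = true → arr.getD i 0 < arr.getD b 0)

theorem pvStep_none (arr : List Int) (act : List Bool) (i : Nat) :
    pvStep arr act none i = if act.getD i false = true then some i else none := by
  simp [pvStep]

theorem pvStep_some (arr : List Int) (act : List Bool) (b i : Nat) :
    pvStep arr act (some b) i =
      if act.getD i false = true ∧ arr.getD b 0 < arr.getD i 0 then some i else some b := by
  simp only [pvStep]
  by_cases h1 : act.getD i false = true <;> by_cases h2 : arr.getD b 0 < arr.getD i 0 <;>
    simp [h1, h2]

theorem pvScan_spec (arr : List Int) (act : List Bool) (k : Nat) :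
    (match pvScan arr act k with
     | none => ∀ i, i < k → act.getD i false = false
     | some b => pvIsBest arr act k b) := by
  induction k with
  | zero => simp [pvScan]
  | succ n ih =>
    unfold pvScan at *
    rw [List.range_succ, List.foldl_append, List.foldl_cons, List.foldl_nil]
    rcases hs : (List.range n).foldl (pvStep arr act) none with _ | b
    · rw [hs] at ih
      have ihn : ∀ i, i < n → act.getD i false = false := ih
      rw [pvStep_none]
      by_cases ha : act.getD n false = true
      · rw [if_pos ha]
        refine ⟨by omega, ha, ?_, ?_⟩
        · intro i hi hact
          rcases Nat.lt_or_ge i n with h | h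
          · rw [ihn i h] at hact; simp at hact
          · have hin : i = n := by omega
            rw [hin]
        · intro i hi hact
          rw [ihn i hi] at hact; simp at hact
      · rw [if_neg ha]
        intro i hi
        rcases Nat.lt_or_ge i n with h | h
        · exact ihn i h
        · have hin : i = n := by omega
          rw [hin]
          cases hx : act.getD n false
          · rfl
          · exact absurd hx ha
    · rw [hs] at ih
      have ihs : pvIsBest arr act n b := ih
      obtain ⟨hbk, hact, hmax, hfirst⟩ := ihs
      rw [pvStep_some]
      by_cases hc : act.getD n false = true ∧ arr.getD b 0 < arr.getD n 0
      · rw [if_pos hc]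
        obtain ⟨han, hlt⟩ := hc
        refine ⟨by omega, han, ?_, ?_⟩
        · intro i hi hacti
          rcases Nat.lt_or_ge i n with h | h
          · have := hmax i h hacti; omega
          · have hin : i = n := by omega
            rw [hin]
        · intro i hi hacti
          have := hmax i hi hacti; omega
      · rw [if_neg hc]
        refine ⟨by omega, hact, ?_, hfirst⟩
        intro i hi hacti
        rcases Nat.lt_or_ge i n with h | h
        · exact hmax i h hacti
        · have hin : i = n := by omega
          rw [hin] at hacti ⊢
          have : ¬ arr.getD b 0 < arr.getD n 0 := fun hlt => hc ⟨hacti, hlt⟩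
          omega

-- the heap-membership invariant relating A's heap to B's active flags
def pvHeapInv (arr : List Int) (k : Nat) (h : List (Int × Int)) (act : List Bool) : Prop :=
  ∀ p : Int × Int, p ∈ h ↔ ∃ j : Nat, j < k ∧ act.getD j false = true ∧ p = (-(arr.getD j 0), (j : Int))

-- under the invariant, heap-min and scan-best select the same index
theorem pvSel_corr (arr : List Int) (k : Nat) (h : List (Int × Int)) (act : List Bool)
    (Hh : pvHeapInv arr k h act) :
    pvMin? h = (pvScan arr act k).map (fun b => (-(arr.getD b 0), (b : Int))) := by
  have hspec := pvScan_spec arr act k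
  rcases hscan : pvScan arr act k with _ | b
  · rw [hscan] at hspec
    have : h = [] := by
      rw [List.eq_nil_iff_forall_not_mem]
      intro p hp
      obtain ⟨j, hj, hact, _⟩ := (Hh p).mp hp
      rw [hspec j hj] at hact; exact Bool.false_ne_true hact
    simp [this, pvMin?]
  · rw [hscan] at hspec
    obtain ⟨hbk, hact, hmax, hfirst⟩ := hspec
    have hq0 : (-(arr.getD b 0), (b : Int)) ∈ h := (Hh _).mpr ⟨b, hbk, hact, rfl⟩
    have hne : h ≠ [] := fun hnil => by simp [hnil] at hq0
    rcases hmin : pvMin? h with _ | q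
    · exact absurd ((pvMin?_eq_none h).mp hmin) hne
    · obtain ⟨hmem, hminle⟩ := pvMin?_spec h q hmin
      obtain ⟨j, hj, hactj, hpj⟩ := (Hh q).mp hmem
      have hle := hminle _ hq0
      rw [pvPairLt_eq_false_iff] at hle
      subst hpj
      simp only at hle
      have harr : arr.getD j 0 = arr.getD b 0 := by
        have := hmax j hj hactj
        omega
      have hjb : j = b := by
        rcases Nat.lt_trichotomy j b with h | h | h
        · have := hfirst j h hactj; omega
        · exact h
        · omega
      subst hjb
      simp [hmin, harr]

-- getD on a mapped range, in if-form
theorem pvGetD_map_range {α : Type} (f : Nat → α) (n j : Nat) (d : α) :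
    ((List.range n).map f).getD j d = if j < n then f j else d := by
  rcases Nat.lt_or_ge j n with h | h
  · simp [List.getD_eq_getElem?_getD, h]
  · have he : ((List.range n).map f)[j]? = none := List.getElem?_eq_none (by simp; omega)
    simp [List.getD_eq_getElem?_getD, he]
    omega

-- main bisimulation between A's loop and B's loop
theorem pvLoop_bisim (arr : List Int) (state0 : List Char) (k L : Nat)
    (hk : k = min arr.length state0.length) (hL : L = state0.length) :
    ∀ fuel (h : List (Int × Int)) (st : List Char) (act seen : List Bool),
      st.length = L → act.length = k → seen.length = k →
      (∀ j, j < k → act.getD j false = true → seen.getD j false = true) →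
      (∀ j, j < L → st.getD j ' ' = if j < k ∧ seen.getD j false = true then '1' else state0.getD j ' ') →
      h.Nodup → pvHeapInv arr k h act →
      pvLoopA arr h st fuel = pvLoopB arr state0 k act seen fuel := by
  intro fuel
  induction fuel with
  | zero => intro h st act seen _ _ _ _ _ _ _; rfl
  | succ fuel ih =>
    intro h st act seen hstL hactk hseenk hAS hST hnd Hh
    have hkL : k ≤ L := by rw [hk, hL]; omega
    simp only [pvLoopA, pvLoopB]
    rw [pvSel_corr arr k h act Hh]
    rcases hscan : pvScan arr act k with _ | b
    · rfl
    · have hbest : pvIsBest arr act k b := by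
        have := pvScan_spec arr act k; rw [hscan] at this; exact this
      obtain ⟨hbk, hact, hmax, hfirst⟩ := hbest
      simp only [Option.map_some]
      have hq0mem : (-(arr.getD b 0), (b : Int)) ∈ h := (Hh _).mpr ⟨b, hbk, hact, rfl⟩
      -- the two branch conditions are equal
      have hcond : ((((b : Int)) != 0) && (PySem.List.pyGetD st ((b : Int) - 1) ' ' == '0'))
          = ((b != 0) && (state0.getD (b - 1) ' ' == '0') && !(seen.getD (b - 1) false)) := by
        by_cases hb0 : b = 0
        · subst hb0; norm_num
        · have hb1 : 1 ≤ b := Nat.one_le_iff_ne_zero.mpr hb0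
          have hcast : (b : Int) - 1 = ((b - 1 : Nat) : Int) := by omega
          have hA1 : PySem.List.pyGetD st ((b : Int) - 1) ' ' = st.getD (b - 1) ' ' := by
            rw [hcast, PySem.List.pyGetD_natCast]
          have hbne : ((b : Int) != 0) = true := by simp; omega
          have hbne' : (b != 0) = true := by simp [hb0]
          have hST' := hST (b - 1) (by omega)
          cases hseen : seen.getD (b - 1) false
          · rw [hseen] at hST'
            rw [if_neg (by simp)] at hST'
            rw [hbne, hbne', hA1, hST']
            simp
          · rw [hseen] at hST'
            have hlt : b - 1 < k := by omega
            rw [if_pos ⟨hlt, rfl⟩] at hST'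
            rw [hbne, hbne', hA1, hST']
            simp
      rw [hcond]
      cases hc : ((b != 0) && (state0.getD (b - 1) ' ' == '0') && !(seen.getD (b - 1) false))
      · -- no activation
        rw [if_neg (by simp), if_neg (by simp)]
        simp only [neg_neg]
        congr 1
        apply ih
        · exact hstL
        · rw [List.length_set]; exact hactk
        · exact hseenk
        · intro j hj haj
          rw [pvGetD_set] at haj
          by_cases hbj : b = j ∧ j < act.length
          · rw [if_pos hbj] at haj; cases haj
          · rw [if_neg hbj] at haj; exact hAS j hj haj
        · exact hST
        · exact hnd.erase _
        · intro p
          rw [List.Nodup.mem_erase_iff hnd]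
          constructor
          · rintro ⟨hne, hp⟩
            obtain ⟨j, hj, haj, rfl⟩ := (Hh p).mp hp
            have hjb : j ≠ b := by
              intro he; subst he; exact hne rfl
            refine ⟨j, hj, ?_, rfl⟩
            rw [pvGetD_set, if_neg (by intro hx; exact hjb hx.1.symm)]
            exact haj
          · rintro ⟨j, hj, haj, rfl⟩
            rw [pvGetD_set] at haj
            by_cases hbj : b = j ∧ j < act.length
            · rw [if_pos hbj] at haj; cases haj
            · rw [if_neg hbj] at haj
              have hjb : j ≠ b := by
                intro he; exact hbj ⟨he.symm, by omega⟩
              refine ⟨?_, (Hh _).mpr ⟨j, hj, haj, rfl⟩⟩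
              intro he
              have : (j : Int) = (b : Int) := congrArg Prod.snd he
              exact hjb (by exact_mod_cast this)
      · -- activation of the left neighbour
        rw [if_pos rfl, if_pos rfl]
        obtain ⟨⟨hbne, hchar⟩, hseenb⟩ := by
          have := hc
          rw [Bool.and_eq_true, Bool.and_eq_true] at this
          exact this
        have hb0 : b ≠ 0 := by simpa using hbne
        have hb1 : 1 ≤ b := Nat.one_le_iff_ne_zero.mpr hb0
        have hblt : b - 1 < k := by omega
        have hseenf : seen.getD (b - 1) false = false := by
          cases hx : seen.getD (b - 1) false
          · rfl
          · rw [hx] at hseenb; cases hseenb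
        have hcast : (b : Int) - 1 = ((b - 1 : Nat) : Int) := by omega
        rw [hcast, PySem.List.pyGetD_natCast, PySem.List.pySetD_natCast]
        simp only [neg_neg]
        congr 1
        apply ih
        · rw [List.length_set]; exact hstL
        · rw [List.length_set, List.length_set]; exact hactk
        · rw [List.length_set]; exact hseenk
        · -- act'' ⊆ seen'
          intro j hj haj
          rw [pvGetD_set seen (b - 1) j true false]
          by_cases hj1 : b - 1 = j ∧ j < seen.length
          · rw [if_pos hj1]
          · rw [if_neg hj1]
            rw [pvGetD_set (act.set b false) (b - 1) j true false] at haj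
            have hj1' : ¬ (b - 1 = j ∧ j < (act.set b false).length) := by
              rw [List.length_set]; rw [hactk]; rw [hseenk] at hj1; exact hj1
            rw [if_neg hj1'] at haj
            rw [pvGetD_set act b j false false] at haj
            by_cases hbj : b = j ∧ j < act.length
            · rw [if_pos hbj] at haj; cases haj
            · rw [if_neg hbj] at haj; exact hAS j hj haj
        · -- the st/seen invariant
          intro j hj
          rw [pvGetD_set st (b - 1) j '1' ' ', pvGetD_set seen (b - 1) j true false]
          by_cases hj1 : b - 1 = j
          · have hjL : j < st.length := by omega
            have hjS : j < seen.length := by rw [hseenk]; omega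
            have e1 : (if b - 1 = j ∧ j < st.length then '1' else st.getD j ' ') = '1' :=
              if_pos ⟨hj1, hjL⟩
            have e2 : (if b - 1 = j ∧ j < seen.length then true else seen.getD j false) = true :=
              if_pos ⟨hj1, hjS⟩
            rw [e1, e2, if_pos ⟨by omega, rfl⟩]
          · have e1 : (if b - 1 = j ∧ j < st.length then '1' else st.getD j ' ') = st.getD j ' ' :=
              if_neg (by intro hx; exact hj1 hx.1)
            have e2 : (if b - 1 = j ∧ j < seen.length then true else seen.getD j false)
                = seen.getD j false := if_neg (by intro hx; exact hj1 hx.1)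
            rw [e1, e2]
            exact hST j hj
        · -- Nodup of the new heap
          refine List.Nodup.cons ?_ (hnd.erase _)
          intro hmem
          have hp := (List.Nodup.mem_erase_iff hnd).mp hmem
          obtain ⟨j, hj, haj, he⟩ := (Hh _).mp hp.2
          have : ((b - 1 : Nat) : Int) = (j : Int) := congrArg Prod.snd he
          have hjb1 : j = b - 1 := by exact_mod_cast this.symm
          subst hjb1
          have := hAS _ hj haj
          rw [hseenf] at this; cases this
        · -- heap invariant for the new state
          intro p
          rw [List.mem_cons, List.Nodup.mem_erase_iff hnd]
          constructor
          · rintro (rfl | ⟨hne, hp⟩)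
            · refine ⟨b - 1, hblt, ?_, rfl⟩
              rw [pvGetD_set (act.set b false) (b - 1) (b - 1) true false,
                  if_pos ⟨rfl, by rw [List.length_set]; omega⟩]
            · obtain ⟨j, hj, haj, rfl⟩ := (Hh p).mp hp
              refine ⟨j, hj, ?_, rfl⟩
              rw [pvGetD_set (act.set b false) (b - 1) j true false]
              by_cases hj1 : b - 1 = j ∧ j < (act.set b false).length
              · rw [if_pos hj1]
              · rw [if_neg hj1]
                rw [pvGetD_set act b j false false]
                have hjb : j ≠ b := by
                  intro he; subst he; exact hne rfl
                rw [if_neg (by intro hx; exact hjb hx.1.symm)]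
                exact haj
          · rintro ⟨j, hj, haj, rfl⟩
            by_cases hj1 : b - 1 = j
            · subst hj1; left; rfl
            · right
              rw [pvGetD_set (act.set b false) (b - 1) j true false,
                  if_neg (by intro hx; exact hj1 hx.1)] at haj
              rw [pvGetD_set act b j false false] at haj
              by_cases hbj : b = j ∧ j < act.length
              · rw [if_pos hbj] at haj; cases haj
              · rw [if_neg hbj] at haj
                have hjb : j ≠ b := by
                  intro he; exact hbj ⟨he.symm, by omega⟩
                refine ⟨?_, (Hh _).mpr ⟨j, hj, haj, rfl⟩⟩
                intro he
                have : (j : Int) = (b : Int) := congrArg Prod.snd he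
                exact hjb (by exact_mod_cast this)

-- the initial heap of A matches the initial flags of B
theorem pvInit (arr : List Int) (st : List Char) :
    ((PySem.List.enumerate (arr.zip st) 0).foldl
      (fun h p => if p.2.2 == '1' then h ++ [(-p.2.1, p.1)] else h) []).Nodup ∧
    pvHeapInv arr (min arr.length st.length)
      ((PySem.List.enumerate (arr.zip st) 0).foldl
        (fun h p => if p.2.2 == '1' then h ++ [(-p.2.1, p.1)] else h) [])
      ((List.range (min arr.length st.length)).map (fun i => st.getD i ' ' == '1')) := by
  have hfold : ((PySem.List.enumerate (arr.zip st) 0).foldl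
      (fun h p => if p.2.2 == '1' then h ++ [(-p.2.1, p.1)] else h) [])
      = ([] : List (Int × Int)) ++
        (((PySem.List.enumerate (arr.zip st) 0).filter (fun p => p.2.2 == '1')).map
          (fun p => (-p.2.1, p.1))) :=
    PySem.List.foldl_append_if _ _ _ _
  rw [hfold, List.nil_append]
  have hlen : (arr.zip st).length = min arr.length st.length := List.length_zip
  constructor
  · -- Nodup: the enumerate indices are strictly increasing
    have hpw := PySem.List.pairwise_lt_enumerate (xs := arr.zip st) (s := 0)
    have hpf := hpw.filter (fun p => p.2.2 == '1')
    have hpm : ((((PySem.List.enumerate (arr.zip st) 0).filter (fun p => p.2.2 == '1')).map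
        (fun p => (-p.2.1, p.1))).Pairwise (fun a b => a.2 < b.2)) := by
      refine List.Pairwise.map _ ?_ hpf
      intro a b hab
      exact hab
    refine hpm.imp ?_
    intro a b hab heq
    rw [heq] at hab
    exact lt_irrefl _ hab
  · intro p
    rw [List.mem_map]
    constructor
    · rintro ⟨q, hq, rfl⟩
      rw [List.mem_filter] at hq
      obtain ⟨hqm, hq1⟩ := hq
      rw [PySem.List.mem_enumerate_iff] at hqm
      obtain ⟨j, hjlen, rfl⟩ := hqm
      have hjk : j < min arr.length st.length := by rw [hlen] at hjlen; exact hjlen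
      refine ⟨j, hjk, ?_, ?_⟩
      · rw [pvGetD_map_range, if_pos hjk]
        have hz : (arr.zip st)[j] = (arr[j]'(by omega), st[j]'(by omega)) := by
          rw [List.getElem_zip]
        rw [hz] at hq1
        simp only at hq1
        rw [List.getD_eq_getElem?_getD, List.getElem?_eq_getElem (by omega : j < st.length)]
        simpa using hq1
      · have hz : (arr.zip st)[j] = (arr[j]'(by omega), st[j]'(by omega)) := by
          rw [List.getElem_zip]
        rw [hz]
        simp only [zero_add]
        rw [List.getD_eq_getElem?_getD, List.getElem?_eq_getElem (by omega : j < arr.length)]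
        rfl
    · rintro ⟨j, hjk, hact, rfl⟩
      have hja : j < arr.length := by omega
      have hjs : j < st.length := by omega
      refine ⟨((j : Int), (arr[j]'hja, st[j]'hjs)), ?_, ?_⟩
      · rw [List.mem_filter]
        constructor
        · rw [PySem.List.mem_enumerate_iff]
          refine ⟨j, by rw [hlen]; omega, ?_⟩
          rw [List.getElem_zip]
          simp
        · rw [pvGetD_map_range, if_pos hjk] at hact
          rw [List.getD_eq_getElem?_getD, List.getElem?_eq_getElem hjs] at hact
          simpa using hact
      · simp only
        rw [List.getD_eq_getElem?_getD, List.getElem?_eq_getElem hja]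
        rfl

-- ===== VERDICT (by name: the statement is the Claim_ definition above) =====
theorem generateNewArray_spec : Claim_equal_generateNewArray := by
  intro arr state m _ _
  unfold Spec_generateNewArray generateNewArray generateNewArray_alt
  obtain ⟨hnd, hinv⟩ := pvInit arr state.toList
  exact pvLoop_bisim arr state.toList (min arr.length state.toList.length) state.toList.length
    rfl rfl m.toNat _ _ _ _ rfl (by simp) (by simp)
    (fun j hj h => h)
    (by
      intro j hj
      by_cases hjk : j < min arr.length state.toList.length
      · rw [pvGetD_map_range, if_pos hjk]
        by_cases hc : state.toList.getD j ' ' = '1'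
        · rw [if_pos ⟨hjk, by simpa using hc⟩, hc]
        · rw [if_neg]
          rintro ⟨_, hb⟩
          exact hc (by simpa using hb)
      · rw [if_neg]
        rintro ⟨h1, _⟩
        exact hjk h1)
    hnd hinv
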